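-- pv_equiv track=rewrite | github.com/ilatims-b/bitsync | Taarun/gaussian_channel_hamming_codes.py | hamming_message_encoder
-- ===== SOURCE A (Python) =====
-- def hamming_message_encoder(message_list, no_of_redundant_bits):
--     no_of_bits = len(message_list)
--     len_of_chunk = 2**no_of_redundant_bits - 1
--     no_of_info_bits_in_chunk = len_of_chunk - no_of_redundant_bits
--     no_of_full_chunks = no_of_bits//no_of_info_bits_in_chunk
--     encoded_message_list = []
--     index = 0
--     next_index = 0
--     for i in range(no_of_full_chunks):
--         next_index += no_of_info_bits_in_chunk
--         relevant_info_chunk = message_list[index:next_index]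
--         index = next_index
--         temp = 1
--         count_of_redundant_bits_added_in_the_chunk = 0
--         chunk = []
--         temp2 = (len_of_chunk+1)*2
--         j = 1
--         while True:
--             if j == temp:
--                 temp = temp*2
--                 if temp2 == temp:
--                     break
--                 count_of_redundant_bits_added_in_the_chunk += 1
--                 chunk.append(0)
--             else:
--                 chunk.append(relevant_info_chunk[j-1-count_of_redundant_bits_added_in_the_chunk])
--             j+=1
--         temp2 = 0
--         for i in range(1, len_of_chunk+1):
--             if chunk[i-1] == 1:
--                 temp2 = temp2^i
--         temp = 1
--         for i in range(no_of_redundant_bits):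
--             chunk[temp-1] = temp2%2
--             temp2 = temp2//2
--             temp *= 2
--         encoded_message_list.extend(chunk)
--     encoded_message_list.extend(message_list[index:])       #to include the leftover bits, the leftover bits are passed without error checking
--     return encoded_message_list
-- ===== SOURCE B (Python) =====
-- def hamming_message_encoder(message_list, no_of_redundant_bits):
--     r = no_of_redundant_bits
--     len_of_chunk = 2 ** r - 1
--     k = len_of_chunk - r
--     full = len(message_list) // k
--     out = []
--     if full:
--         parity_positions = [2 ** b for b in range(r)]
--         for c in range(full):
--             info = message_list[c * k:(c + 1) * k]
--             chunk = []
--             idx = 0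
--             for p in range(1, len_of_chunk + 1):
--                 if p in parity_positions:
--                     chunk.append(0)
--                 else:
--                     chunk.append(info[idx])
--                     idx += 1
--             for b in range(r):
--                 parity = 0
--                 for p in range(1, len_of_chunk + 1):
--                     if (p // (2 ** b)) % 2 == 1 and chunk[p - 1] == 1:
--                         parity ^= 1
--                 chunk[parity_positions[b] - 1] = parity
--             out.extend(chunk)
--     return out + message_list[full * k:]
-- ===== Notes on version B (the rewrite author's own statement) =====
-- stated objective: alternative
-- what changed: A builds each codeword with a doubling-counter walk (temp, count) and computes all parity bits at once from a single combined XOR-of-positions syndrome that it then bit-decomposes; B classifies positions by membership in a precomputed power-of-two list and computes each parity bit with its own pass over the chunk (one pass per redundant bit), assembling the same codeword.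
import Mathlib
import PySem

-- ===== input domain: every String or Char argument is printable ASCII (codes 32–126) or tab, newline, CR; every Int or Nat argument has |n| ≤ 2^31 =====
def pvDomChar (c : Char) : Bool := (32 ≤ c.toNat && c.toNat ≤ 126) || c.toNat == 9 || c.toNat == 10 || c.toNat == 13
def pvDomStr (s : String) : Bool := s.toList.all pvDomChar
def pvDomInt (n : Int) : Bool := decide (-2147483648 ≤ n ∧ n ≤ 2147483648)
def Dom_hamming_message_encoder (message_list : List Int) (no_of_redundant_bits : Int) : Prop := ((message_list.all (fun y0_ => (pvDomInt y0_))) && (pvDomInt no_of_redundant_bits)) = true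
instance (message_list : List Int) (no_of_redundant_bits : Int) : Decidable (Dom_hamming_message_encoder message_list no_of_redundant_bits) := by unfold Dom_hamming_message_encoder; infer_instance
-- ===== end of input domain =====

-- B re-decomposes the encoder: chunk positions are classified by membership in an explicit
-- power-of-two position list and each parity bit is computed by its own pass, instead of A's
-- doubling-counter walk and single combined-XOR syndrome pass; equal returns proved for r >= 2.


-- ===== PORT A =====
-- A's 'while True' chunk-building loop, step for step; the fuel argument only makes the
-- recursion total (inside Pre_ the loop breaks after len_of_chunk+1 iterations, within the
-- fuel the caller supplies).
def pvA_while (info : List Int) (temp2b : Int) : Nat → Int → Int → Int → List Int → List Int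
  | 0, _, _, _, chunk => chunk
  | fuel+1, j, temp, count, chunk =>
    if j = temp then
      (if temp2b = temp * 2 then chunk
       else pvA_while info temp2b fuel (j+1) (temp*2) (count+1) (chunk ++ [0]))
    else pvA_while info temp2b fuel (j+1) temp count
           (chunk ++ [PySem.List.pyGetD info (j - 1 - count) 0])

-- the body of A's 'for i in range(no_of_full_chunks)' loop after the slice: build the chunk,
-- take the XOR syndrome of 1-positions, write its bits into the parity slots
def pvA_encode_chunk (relevant_info_chunk : List Int) (len_of_chunk r : Int) : List Int :=
  let chunk := pvA_while relevant_info_chunk ((len_of_chunk + 1) * 2) (len_of_chunk + 2).toNat 1 1 0 []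
  let temp2 := (PySem.List.pyRange 1 (len_of_chunk + 1) 1).foldl
    (fun t2 i => if PySem.List.pyGetD chunk (i - 1) 0 = 1 then PySem.Int.bxor t2 i else t2) 0
  let fin := (PySem.List.pyRange 0 r 1).foldl
    (fun (s2 : List Int × Int × Int) _ =>
      (PySem.List.pySetD s2.1 (s2.2.2 - 1) (PySem.Int.mod s2.2.1 2),
       PySem.Int.floordiv s2.2.1 2, s2.2.2 * 2))
    (chunk, temp2, 1)
  fin.1

-- '2**no_of_redundant_bits' is ported as 2 ^ toNat: exact for no_of_redundant_bits ≥ 0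
-- (for negative r Python produces a float and raises TypeError downstream; Pre_ needs 2 ≤ r).
def hamming_message_encoder (message_list : List Int) (no_of_redundant_bits : Int) : List Int :=
  let no_of_bits : Int := message_list.length
  let len_of_chunk : Int := 2 ^ no_of_redundant_bits.toNat - 1
  let no_of_info_bits_in_chunk : Int := len_of_chunk - no_of_redundant_bits
  let no_of_full_chunks : Int := PySem.Int.floordiv no_of_bits no_of_info_bits_in_chunk
  let st := (PySem.List.pyRange 0 no_of_full_chunks 1).foldl
    (fun (s : List Int × Int × Int) _ =>
      (s.1 ++ pvA_encode_chunk
          (PySem.List.slice message_list (some s.2.1) (some (s.2.2 + no_of_info_bits_in_chunk)))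
          len_of_chunk no_of_redundant_bits,
       s.2.2 + no_of_info_bits_in_chunk, s.2.2 + no_of_info_bits_in_chunk))
    ([], 0, 0)
  st.1 ++ PySem.List.slice message_list (some st.2.1) none

-- ===== PORT B =====
-- parity for parity slot b: one pass XORing the 1-bits at positions whose b-th digit is set
def pvB_parity (chunk : List Int) (len_of_chunk : Int) (b : Int) : Int :=
  (PySem.List.pyRange 1 (len_of_chunk + 1) 1).foldl
    (fun parity p =>
      if PySem.Int.mod (PySem.Int.floordiv p (2 ^ b.toNat)) 2 = 1 ∧ PySem.List.pyGetD chunk (p - 1) 0 = 1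
      then PySem.Int.bxor parity 1 else parity) 0

-- B's per-chunk encoder: place info bits at non-parity positions (membership test in the
-- parity-position list), then compute each parity bit by its own pass
def pvB_encode_chunk (info pps : List Int) (len_of_chunk r : Int) : List Int :=
  let built := (PySem.List.pyRange 1 (len_of_chunk + 1) 1).foldl
    (fun (s : List Int × Int) p =>
      if pps.contains p then (s.1 ++ [0], s.2)
      else (s.1 ++ [PySem.List.pyGetD info s.2 0], s.2 + 1)) ([], 0)
  (PySem.List.pyRange 0 r 1).foldl
    (fun chunk b =>
      PySem.List.pySetD chunk (PySem.List.pyGetD pps b 0 - 1) (pvB_parity chunk len_of_chunk b))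
    built.1

-- '2**b' for b from range(no_of_redundant_bits): b ≥ 0, ported as 2 ^ b.toNat (exact there)
def hamming_message_encoder_alt (message_list : List Int) (no_of_redundant_bits : Int) : List Int :=
  let len_of_chunk : Int := 2 ^ no_of_redundant_bits.toNat - 1
  let k : Int := len_of_chunk - no_of_redundant_bits
  let full : Int := PySem.Int.floordiv (message_list.length : Int) k
  let out := if full ≠ 0 then
      (let pps : List Int := (PySem.List.pyRange 0 no_of_redundant_bits 1).map (fun b => (2:Int) ^ b.toNat)
       (PySem.List.pyRange 0 full 1).foldl
        (fun acc c =>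
          acc ++ pvB_encode_chunk (PySem.List.slice message_list (some (c * k)) (some ((c + 1) * k)))
                  pps len_of_chunk no_of_redundant_bits) [])
    else []
  out ++ PySem.List.slice message_list (some (full * k)) none

-- ===== PRECONDITION & SPEC =====
-- Pre_ excludes exactly the inputs on which A raises: for no_of_redundant_bits ∈ {0,1} a chunk
-- has no info bits and A's '//' raises ZeroDivisionError; for negative values '2**r' is a
-- float and A raises TypeError.  A returns normally whenever 2 ≤ no_of_redundant_bits.
def Pre_hamming_message_encoder (message_list : List Int) (no_of_redundant_bits : Int) : Prop :=
  2 ≤ no_of_redundant_bits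
instance (message_list : List Int) (no_of_redundant_bits : Int) : Decidable (Pre_hamming_message_encoder message_list no_of_redundant_bits) := by unfold Pre_hamming_message_encoder; infer_instance
def pvWitness_hamming_message_encoder : List Int × Int := ([1, 0, 1, 1, 0], 3)

def Spec_hamming_message_encoder (message_list : List Int) (no_of_redundant_bits : Int) (out : List Int) : Prop := out = hamming_message_encoder_alt message_list no_of_redundant_bits
instance (message_list : List Int) (no_of_redundant_bits : Int) (out : List Int) : Decidable (Spec_hamming_message_encoder message_list no_of_redundant_bits out) := by unfold Spec_hamming_message_encoder; infer_instance

-- ===== CLAIM (what is proved, stated in full; the proofs are below) =====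
def Claim_equal_hamming_message_encoder : Prop := ∀ (message_list : List Int) (no_of_redundant_bits : Int), Dom_hamming_message_encoder message_list no_of_redundant_bits → Pre_hamming_message_encoder message_list no_of_redundant_bits → Spec_hamming_message_encoder message_list no_of_redundant_bits (hamming_message_encoder message_list no_of_redundant_bits)

-- ===== LEMMAS AND PROOFS =====


theorem pow2_inj (c R : Nat) (h : (2:Int)^c = 2^R) : c = R := by
  rcases lt_trichotomy c R with h'|h'|h'
  · have := pow_lt_pow_right₀ (a := (2:Int)) one_lt_two h'; omega
  · exact h'
  · have := pow_lt_pow_right₀ (a := (2:Int)) one_lt_two h'; omega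

theorem pv_build (info pps : List Int) (R : Nat)
    (hpps : ∀ x : Int, pps.contains x = true ↔ ∃ b : Nat, b < R ∧ x = (2:Int)^b) :
    ∀ (fuel : Nat) (j : Int) (c : Nat) (chunk : List Int),
    1 ≤ j → j ≤ (2:Int)^c → (2:Int)^c < 2*j → j ≤ (2:Int)^R → c ≤ R →
    ((2:Int)^R - j).toNat < fuel →
    pvA_while info ((2:Int)^R * 2) fuel j ((2:Int)^c) (c : Int) chunk
      = ((PySem.List.pyRange j ((2:Int)^R) 1).foldl
          (fun (s : List Int × Int) p =>
            if pps.contains p then (s.1 ++ [0], s.2)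
            else (s.1 ++ [PySem.List.pyGetD info s.2 0], s.2 + 1)) (chunk, j - 1 - (c:Int))).1 := by
  intro fuel
  induction fuel with
  | zero => intro j c chunk _ _ _ _ _ hf; omega
  | succ f ih =>
    intro j c chunk h1 h2 h3 h4 hcR hf
    by_cases hj : j = (2:Int)^c
    · by_cases hbr : (2:Int)^R * 2 = (2:Int)^c * 2
      · have hcRe : c = R := (pow2_inj c R (by linarith)).symm ▸ rfl
        have hcRe : c = R := pow2_inj R c (by linarith) |>.symm
        have hjR : j = (2:Int)^R := by rw [hj, hcRe]
        rw [pvA_while, if_pos hj, if_pos hbr, PySem.List.pyRange_one_eq_nil (by rw [hjR])]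
        rfl
      · have hcR' : c < R := by
          rcases Nat.lt_or_ge c R with h|h
          · exact h
          · exfalso; apply hbr
            have : c = R := le_antisymm hcR h
            rw [this]
        have hjlt : j < (2:Int)^R := by
          have := pow_lt_pow_right₀ (a := (2:Int)) one_lt_two hcR'
          omega
        rw [pvA_while, if_pos hj, if_neg hbr,
            PySem.List.pyRange_one_cons (by omega)]
        have hcontains : pps.contains j = true := (hpps j).2 ⟨c, hcR', hj⟩
        rw [List.foldl_cons]
        simp only [hcontains, if_pos]
        have hrec := ih (j+1) (c+1) (chunk ++ [0]) (by omega)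
          (by rw [pow_succ]; omega) (by rw [pow_succ]; omega)
          (by omega) (by omega) (by omega)
        rw [pow_succ] at hrec
        have hcast : ((c:Int) + 1) = ((c+1 : Nat) : Int) := by push_cast; ring
        rw [hcast]
        have hst : (j+1) - 1 - ((c+1 : Nat) : Int) = j - 1 - (c:Int) := by push_cast; ring
        rw [hst] at hrec
        exact hrec
    · have hjlt2c : j < (2:Int)^c := lt_of_le_of_ne h2 hj
      have hjltR : j < (2:Int)^R := by
        have := pow_le_pow_right₀ (a := (2:Int)) (by norm_num) hcR
        omega
      have hnc : pps.contains j = false := by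
        rw [Bool.eq_false_iff]
        intro hc
        obtain ⟨b, hbR, hjb⟩ := (hpps j).1 hc
        have hbc : b < c := by
          by_contra h
          push Not at h
          have := pow_le_pow_right₀ (a := (2:Int)) (by norm_num) h
          omega
        have : b + 1 ≤ c := hbc
        have := pow_le_pow_right₀ (a := (2:Int)) (by norm_num) this
        rw [pow_succ] at this
        omega
      rw [pvA_while, if_neg hj, PySem.List.pyRange_one_cons (by omega), List.foldl_cons]
      simp only [hnc, Bool.false_eq_true, if_false]
      have hrec := ih (j+1) c (chunk ++ [PySem.List.pyGetD info (j - 1 - (c:Int)) 0])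
        (by omega) (by omega) (by omega) (by omega) hcR (by omega)
      have hst : (j+1) - 1 - (c:Int) = j - 1 - (c:Int) + 1 := by ring
      rw [hst] at hrec
      exact hrec

theorem pv_nat_bit (m n b : Nat) :
    (m ^^^ n) / 2^b % 2 = if n / 2^b % 2 = 1 then (if m / 2^b % 2 = 1 then 0 else 1) else m / 2^b % 2 := by
  have hm := Nat.testBit_eq_decide_div_mod_eq (x := m) (i := b)
  have hn := Nat.testBit_eq_decide_div_mod_eq (x := n) (i := b)
  have hx := Nat.testBit_eq_decide_div_mod_eq (x := m ^^^ n) (i := b)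
  have hxor : (m ^^^ n).testBit b = ((m.testBit b) ^^ (n.testBit b)) := Nat.testBit_xor m n b
  have h2m : m / 2^b % 2 = 0 ∨ m / 2^b % 2 = 1 := Nat.mod_two_eq_zero_or_one _
  have h2n : n / 2^b % 2 = 0 ∨ n / 2^b % 2 = 1 := Nat.mod_two_eq_zero_or_one _
  have h2x : (m ^^^ n) / 2^b % 2 = 0 ∨ (m ^^^ n) / 2^b % 2 = 1 := Nat.mod_two_eq_zero_or_one _
  rw [hxor, hm, hn] at hx
  rcases h2m with hm'|hm' <;> rcases h2n with hn'|hn' <;>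
    simp [hm', hn'] at hx ⊢ <;> omega

theorem pv_bit_bxor (a i : Int) (ha : 0 ≤ a) (hi : 0 ≤ i) (b : Nat) :
    PySem.Int.mod (PySem.Int.floordiv (PySem.Int.bxor a i) ((2:Int)^b)) 2 =
      if PySem.Int.mod (PySem.Int.floordiv i ((2:Int)^b)) 2 = 1
      then PySem.Int.bxor (PySem.Int.mod (PySem.Int.floordiv a ((2:Int)^b)) 2) 1
      else PySem.Int.mod (PySem.Int.floordiv a ((2:Int)^b)) 2 := by
  obtain ⟨m, rfl⟩ : ∃ m : Nat, a = (m:Int) := ⟨a.toNat, (Int.toNat_of_nonneg ha).symm⟩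
  obtain ⟨n, rfl⟩ : ∃ n : Nat, i = (n:Int) := ⟨i.toNat, (Int.toNat_of_nonneg hi).symm⟩
  have hp : (2:Int)^b = ((2^b : Nat) : Int) := by push_cast; ring
  have h2 : (2:Int) = ((2:Nat):Int) := rfl
  rw [hp, PySem.Int.bxor_natCast, PySem.Int.floordiv_natCast, PySem.Int.floordiv_natCast,
      PySem.Int.floordiv_natCast, h2, PySem.Int.mod_natCast, PySem.Int.mod_natCast, PySem.Int.mod_natCast]
  rw [pv_nat_bit]
  by_cases hn1 : n / 2^b % 2 = 1
  · by_cases hm1 : m / 2^b % 2 = 1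
    · simp [hn1, hm1]
      try decide
    · have : m / 2^b % 2 = 0 := by omega
      simp [hn1, this]
      try decide
  · have : n / 2^b % 2 = 0 := by omega
    simp [this]

theorem pv_bxor_nonneg (a i : Int) (ha : 0 ≤ a) (hi : 0 ≤ i) : 0 ≤ PySem.Int.bxor a i := by
  rw [PySem.Int.bxor_of_nonneg ha hi]; positivity

theorem pv_syn_nonneg (cond : Int → Prop) [DecidablePred cond] :
    ∀ (l : List Int) (a : Int), 0 ≤ a → (∀ i ∈ l, 0 ≤ i) →
    0 ≤ l.foldl (fun t2 i => if cond i then PySem.Int.bxor t2 i else t2) a := by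
  intro l
  induction l with
  | nil => intro a ha _; simpa using ha
  | cons i t ih =>
    intro a ha hl
    rw [List.foldl_cons]
    by_cases hc : cond i
    · simp only [if_pos hc]
      exact ih _ (pv_bxor_nonneg a i ha (hl i (by simp))) (fun x hx => hl x (by simp [hx]))
    · simp only [if_neg hc]
      exact ih _ ha (fun x hx => hl x (by simp [hx]))

theorem pv_xor_fold_bit (cond : Int → Prop) [DecidablePred cond] (b : Nat) :
    ∀ (l : List Int) (a : Int), 0 ≤ a → (∀ i ∈ l, 0 ≤ i) →
    PySem.Int.mod (PySem.Int.floordiv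
        (l.foldl (fun t2 i => if cond i then PySem.Int.bxor t2 i else t2) a) ((2:Int)^b)) 2
    = l.foldl (fun parity p =>
        if PySem.Int.mod (PySem.Int.floordiv p ((2:Int)^b)) 2 = 1 ∧ cond p
        then PySem.Int.bxor parity 1 else parity)
        (PySem.Int.mod (PySem.Int.floordiv a ((2:Int)^b)) 2) := by
  intro l
  induction l with
  | nil => intro a _ _; simp
  | cons i t ih =>
    intro a ha hl
    have hi : 0 ≤ i := hl i (by simp)
    rw [List.foldl_cons, List.foldl_cons]
    by_cases hc : cond i
    · rw [if_pos hc]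
      rw [ih _ (pv_bxor_nonneg a i ha hi) (fun x hx => hl x (by simp [hx]))]
      congr 1
      rw [pv_bit_bxor a i ha hi b]
      by_cases hbit : PySem.Int.mod (PySem.Int.floordiv i ((2:Int)^b)) 2 = 1
      · rw [if_pos hbit, if_pos ⟨hbit, hc⟩]
      · rw [if_neg hbit, if_neg (fun h => hbit h.1)]
    · rw [if_neg hc, if_neg (fun h => hc h.2)]
      exact ih _ ha (fun x hx => hl x (by simp [hx]))


theorem pv_pow_div_zero (j i : Nat) (h : j < i) :
    PySem.Int.floordiv ((2:Int)^j) ((2:Int)^i) = 0 := by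
  rw [PySem.Int.floordiv_eq_ediv_of_pos (by positivity)]
  exact Int.ediv_eq_zero_of_lt (by positivity) (pow_lt_pow_right₀ one_lt_two h)

theorem pv_mod_zero_two : PySem.Int.mod 0 2 = 0 := by
  rw [PySem.Int.mod_eq_emod_of_pos (by norm_num)]; rfl

theorem pv_floordiv_zero (x : Int) (hx : 0 < x) : PySem.Int.floordiv 0 x = 0 := by
  rw [PySem.Int.floordiv_eq_ediv_of_pos hx]; simp

-- parity value B computes at step i equals the i-th bit A extracts from its syndrome
theorem pv_parity_value (R : Nat) (chunk0 ch : List Int) (i : Nat)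
    (hch : ∀ p : Int, 1 ≤ p → p ≤ (2:Int)^R - 1 → (∀ j : Nat, j < i → p ≠ (2:Int)^j) →
       PySem.List.pyGetD ch (p-1) 0 = PySem.List.pyGetD chunk0 (p-1) 0)
    (N : Nat)
    (hN : (N : Int) = (PySem.List.pyRange 1 ((2:Int)^R) 1).foldl
        (fun t2 p => if PySem.List.pyGetD chunk0 (p-1) 0 = 1 then PySem.Int.bxor t2 p else t2) 0) :
    pvB_parity ch ((2:Int)^R - 1) (i : Int) = PySem.Int.mod ((N / 2^i : Nat) : Int) 2 := by
  have hnn : ∀ p ∈ PySem.List.pyRange 1 ((2:Int)^R) 1, 0 ≤ p := by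
    intro p hp
    rw [PySem.List.mem_pyRange_one] at hp
    omega
  unfold pvB_parity
  rw [show ((i:Int)).toNat = i from Int.toNat_natCast i,
      show (2:Int)^R - 1 + 1 = 2^R from by ring]
  -- replace ch by chunk0 inside the condition
  refine (PySem.List.foldl_congr_mem _ _ (fun parity p =>
      if PySem.Int.mod (PySem.Int.floordiv p ((2:Int)^i)) 2 = 1 ∧ PySem.List.pyGetD chunk0 (p - 1) 0 = 1
      then PySem.Int.bxor parity 1 else parity) _ ?_).trans ?_
  · intro acc p hp
    rw [PySem.List.mem_pyRange_one] at hp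
    by_cases hbit : PySem.Int.mod (PySem.Int.floordiv p ((2:Int)^i)) 2 = 1
    · have hpne : ∀ j : Nat, j < i → p ≠ (2:Int)^j := by
        intro j hj hpj
        rw [hpj, pv_pow_div_zero j i hj, pv_mod_zero_two] at hbit
        norm_num at hbit
      rw [hch p (by omega) (by omega) hpne]
    · dsimp only
      rw [if_neg (fun h => hbit h.1), if_neg (fun h => hbit h.1)]
  -- now apply the xor-fold bit lemma
  have hfold := pv_xor_fold_bit (cond := fun p => PySem.List.pyGetD chunk0 (p - 1) 0 = 1) i
      (PySem.List.pyRange 1 ((2:Int)^R) 1) 0 le_rfl hnn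
  rw [← hN] at hfold
  rw [pv_floordiv_zero _ (by positivity), pv_mod_zero_two] at hfold
  rw [← hfold]
  have hp : (2:Int)^i = ((2^i : Nat) : Int) := by push_cast; ring
  rw [hp, PySem.Int.floordiv_natCast]

theorem pv_getD_set_other (ch : List Int) (P p : Int) (v : Int)
    (hP : 1 ≤ P) (hp1 : 1 ≤ p) (hplen : p ≤ (ch.length : Int)) (hne : p ≠ P) :
    PySem.List.pyGetD (PySem.List.pySetD ch (P - 1) v) (p - 1) 0 = PySem.List.pyGetD ch (p - 1) 0 := by
  rw [PySem.List.pySetD_of_nonneg ch v (by omega)]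
  rw [PySem.List.pyGetD_eq_getElem _ 0 (by omega) (by simp; omega)]
  rw [PySem.List.pyGetD_eq_getElem _ 0 (by omega) (by omega)]
  exact List.getElem_set_ne (by omega) _

theorem pv_div_succ (N i : Nat) :
    PySem.Int.floordiv ((N / 2^i : Nat) : Int) 2 = ((N / 2^(i+1) : Nat) : Int) := by
  have h2 : (2:Int) = ((2:Nat):Int) := rfl
  rw [h2, PySem.Int.floordiv_natCast]
  congr 1
  rw [Nat.div_div_eq_div_mul, pow_succ]

theorem pv_parity_go (R : Nat) (pps chunk0 : List Int)
    (hlen0 : (chunk0.length : Int) = (2:Int)^R - 1)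
    (hpps : ∀ i : Nat, i < R → PySem.List.pyGetD pps (i:Int) 0 = (2:Int)^i)
    (N : Nat)
    (hN : (N : Int) = (PySem.List.pyRange 1 ((2:Int)^R) 1).foldl
        (fun t2 p => if PySem.List.pyGetD chunk0 (p-1) 0 = 1 then PySem.Int.bxor t2 p else t2) 0) :
    ∀ (d i : Nat), R - i = d → i ≤ R → ∀ (ch : List Int),
    ch.length = chunk0.length →
    (∀ p : Int, 1 ≤ p → p ≤ (2:Int)^R - 1 → (∀ j : Nat, j < i → p ≠ (2:Int)^j) →
       PySem.List.pyGetD ch (p-1) 0 = PySem.List.pyGetD chunk0 (p-1) 0) →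
    ((PySem.List.pyRange (i:Int) (R:Int) 1).foldl
        (fun (s2 : List Int × Int × Int) _ =>
          (PySem.List.pySetD s2.1 (s2.2.2 - 1) (PySem.Int.mod s2.2.1 2),
           PySem.Int.floordiv s2.2.1 2, s2.2.2 * 2))
        (ch, ((N / 2^i : Nat) : Int), (2:Int)^i)).1
    = (PySem.List.pyRange (i:Int) (R:Int) 1).foldl
        (fun chnk b =>
          PySem.List.pySetD chnk (PySem.List.pyGetD pps b 0 - 1) (pvB_parity chnk ((2:Int)^R - 1) b))
        ch := by
  intro d
  induction d with
  | zero =>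
    intro i hdi hiR ch _ _
    have : i = R := by omega
    subst this
    rw [PySem.List.pyRange_one_eq_nil le_rfl]
    rfl
  | succ d ih =>
    intro i hdi hiR ch hlen hch
    have hiR' : i < R := by omega
    rw [PySem.List.pyRange_one_cons (by exact_mod_cast Nat.cast_lt.mpr hiR'), List.foldl_cons, List.foldl_cons]
    dsimp only
    have hv := pv_parity_value R chunk0 ch i hch N hN
    rw [hpps i hiR', hv, pv_div_succ]
    have hP1 : (1:Int) ≤ 2^i := one_le_pow₀ (by norm_num)
    have hsucc : (2:Int)^i * 2 = 2^(i+1) := by rw [pow_succ]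
    have hcast : ((i:Int) + 1) = ((i+1 : Nat) : Int) := by push_cast; ring
    rw [hsucc, hcast]
    set ch' := PySem.List.pySetD ch ((2:Int)^i - 1) (PySem.Int.mod ((N / 2^i : Nat) : Int) 2) with hch'
    have h1 : ch'.length = chunk0.length := by rw [hch', PySem.List.length_pySetD]; exact hlen
    have h2 : ∀ p : Int, 1 ≤ p → p ≤ (2:Int)^R - 1 → (∀ j : Nat, j < i+1 → p ≠ (2:Int)^j) →
        PySem.List.pyGetD ch' (p-1) 0 = PySem.List.pyGetD chunk0 (p-1) 0 := by
      intro p hp1 hpL hpj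
      have hlen' : p ≤ (ch.length : Int) := by omega
      rw [hch', pv_getD_set_other ch ((2:Int)^i) p _ hP1 hp1 hlen' (hpj i (by omega))]
      exact hch p hp1 hpL (fun j hj => hpj j (by omega))
    exact ih (i+1) (by omega) (by omega) ch' h1 h2



theorem pv_build_len (info pps : List Int) :
    ∀ (l : List Int) (s : List Int × Int),
    ((l.foldl (fun (s : List Int × Int) p =>
      if pps.contains p then (s.1 ++ [0], s.2)
      else (s.1 ++ [PySem.List.pyGetD info s.2 0], s.2 + 1)) s).1).length = s.1.length + l.length := by
  intro l
  induction l with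
  | nil => intro s; simp
  | cons p t ih =>
    intro s
    rw [List.foldl_cons]
    by_cases hc : pps.contains p = true
    · rw [if_pos hc, ih]; simp; omega
    · rw [if_neg hc, ih]; simp; omega

theorem pv_RP (R : Nat) (hR : 2 ≤ R) : R + 2 ≤ 2^R := by
  induction R with
  | zero => omega
  | succ n ih =>
    rcases Nat.lt_or_ge n 2 with h|h
    · interval_cases n <;> simp_all
    · have := ih h
      have : 1 ≤ 2^n := Nat.one_le_two_pow
      rw [pow_succ]; omega

theorem pv_chunk (R : Nat) (hR : 2 ≤ R) (info pps : List Int)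
    (hppsdef : pps = (PySem.List.pyRange 0 (R:Int) 1).map (fun b => (2:Int)^b.toNat)) :
    pvA_encode_chunk info ((2:Int)^R - 1) (R:Int) = pvB_encode_chunk info pps ((2:Int)^R - 1) (R:Int) := by
  have h1R : (1:Int) ≤ 2^R := one_le_pow₀ (by norm_num)
  have hcont : ∀ x : Int, pps.contains x = true ↔ ∃ b : Nat, b < R ∧ x = (2:Int)^b := by
    intro x
    rw [hppsdef]
    rw [List.contains_iff_mem, List.mem_map]
    constructor
    · rintro ⟨b, hb, rfl⟩
      rw [PySem.List.mem_pyRange_one] at hb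
      exact ⟨b.toNat, by omega, rfl⟩
    · rintro ⟨b, hbR, rfl⟩
      refine ⟨(b:Int), ?_, by simp⟩
      rw [PySem.List.mem_pyRange_one]
      omega
  have hgetpps : ∀ i : Nat, i < R → PySem.List.pyGetD pps (i:Int) 0 = (2:Int)^i := by
    intro i hi
    rw [hppsdef, PySem.List.pyGetD_map_pyRange_of_nonneg _ _ _ _ (by positivity) (by exact_mod_cast hi)]
    simp
  simp only [pvA_encode_chunk, pvB_encode_chunk]
  rw [show (2:Int)^R - 1 + 1 = 2^R from by ring]
  have hbuild := pv_build info pps R hcont ((2:Int)^R - 1 + 2).toNat 1 0 []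
    le_rfl (by norm_num) (by norm_num) (by omega) (by omega) (by omega)
  simp only [pow_zero, Nat.cast_zero, show (1:Int) - 1 - 0 = 0 from by ring] at hbuild
  rw [hbuild]
  set chunk0 := ((PySem.List.pyRange 1 ((2:Int)^R) 1).foldl
      (fun (s : List Int × Int) p =>
        if pps.contains p then (s.1 ++ [0], s.2)
        else (s.1 ++ [PySem.List.pyGetD info s.2 0], s.2 + 1)) ([], 0)).1 with hchunk0
  have hlen : (chunk0.length : Int) = (2:Int)^R - 1 := by
    rw [hchunk0, pv_build_len]
    rw [PySem.List.length_pyRange_one]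
    simp
  set temp2 := (PySem.List.pyRange 1 ((2:Int)^R) 1).foldl
      (fun t2 i => if PySem.List.pyGetD chunk0 (i - 1) 0 = 1 then PySem.Int.bxor t2 i else t2) 0 with htemp2
  have hnn : ∀ p ∈ PySem.List.pyRange 1 ((2:Int)^R) 1, 0 ≤ p := by
    intro p hp; rw [PySem.List.mem_pyRange_one] at hp; omega
  have ht2nn : 0 ≤ temp2 := pv_syn_nonneg _ _ 0 le_rfl hnn
  have hN : ((temp2.toNat : Nat) : Int) = temp2 := Int.toNat_of_nonneg ht2nn
  have hgo := pv_parity_go R pps chunk0 hlen hgetpps temp2.toNat (by rw [hN]) R 0 (by omega) (by omega)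
      chunk0 rfl (fun p _ _ _ => rfl)
  simp only [pow_zero, Nat.div_one, Nat.cast_zero, hN] at hgo
  exact hgo

theorem pv_outer_go (ml pps : List Int) (L r k full : Int)
    (hE : ∀ info : List Int, pvA_encode_chunk info L r = pvB_encode_chunk info pps L r) :
    ∀ (d : Nat) (c0 : Int), full - c0 = (d:Int) → 0 ≤ c0 → ∀ (acc : List Int),
    (PySem.List.pyRange c0 full 1).foldl
      (fun (s : List Int × Int × Int) _ =>
        (s.1 ++ pvA_encode_chunk (PySem.List.slice ml (some s.2.1) (some (s.2.2 + k))) L r,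
         s.2.2 + k, s.2.2 + k))
      (acc, c0 * k, c0 * k)
    = ((PySem.List.pyRange c0 full 1).foldl
        (fun acc c => acc ++ pvB_encode_chunk (PySem.List.slice ml (some (c * k)) (some ((c + 1) * k))) pps L r)
        acc, full * k, full * k) := by
  intro d
  induction d with
  | zero =>
    intro c0 hd _ acc
    have : c0 = full := by omega
    subst this
    rw [PySem.List.pyRange_one_eq_nil le_rfl]
    rfl
  | succ d ih =>
    intro c0 hd hc0 acc
    have hlt : c0 < full := by omega
    rw [PySem.List.pyRange_one_cons hlt, List.foldl_cons, List.foldl_cons]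
    dsimp only
    rw [show c0 * k + k = (c0 + 1) * k from by ring, hE]
    exact ih (c0 + 1) (by omega) (by omega) _

theorem pv_main : ∀ (ml : List Int) (r : Int), 2 ≤ r →
    hamming_message_encoder ml r = hamming_message_encoder_alt ml r := by
  intro ml r hr
  obtain ⟨R, rfl⟩ : ∃ R : Nat, r = (R:Int) := ⟨r.toNat, (Int.toNat_of_nonneg (by omega)).symm⟩
  have hR : 2 ≤ R := by exact_mod_cast hr
  have hk1 : (1:Int) ≤ (2:Int)^R - 1 - (R:Int) := by
    have h1 := pv_RP R hR
    have h2 : ((R:Int)) + 2 ≤ (2:Int)^R := by exact_mod_cast Nat.cast_le.mpr h1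
    omega
  simp only [hamming_message_encoder, hamming_message_encoder_alt, Int.toNat_natCast]
  set k : Int := (2:Int)^R - 1 - (R:Int) with hk
  set full : Int := PySem.Int.floordiv (ml.length : Int) k with hfull
  have hfull0 : 0 ≤ full := by
    rw [hfull, PySem.Int.floordiv_eq_ediv_of_pos (by omega)]
    exact Int.ediv_nonneg (by positivity) (by omega)
  have hE : ∀ info : List Int,
      pvA_encode_chunk info ((2:Int)^R - 1) (R:Int)
        = pvB_encode_chunk info ((PySem.List.pyRange 0 (R:Int) 1).map (fun b => (2:Int)^b.toNat)) ((2:Int)^R - 1) (R:Int) :=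
    fun info => pv_chunk R hR info _ rfl
  by_cases hf : full = 0
  · rw [if_neg (by omega : ¬ full ≠ 0)]
    rw [hf, PySem.List.pyRange_one_eq_nil le_rfl]
    simp
  · rw [if_pos hf]
    have hout := pv_outer_go ml ((PySem.List.pyRange 0 (R:Int) 1).map (fun b => (2:Int)^b.toNat))
        ((2:Int)^R - 1) (R:Int) k full hE full.toNat 0 (by omega) le_rfl []
    rw [zero_mul] at hout
    rw [hout]

-- ===== VERDICT (by name: the statement is the Claim_ definition above) =====
theorem hamming_message_encoder_spec : Claim_equal_hamming_message_encoder := by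
  intro ml r _ hpre
  exact pv_main ml r hpre
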